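-- pv_equiv track=rewrite | github.com/dmeloca/Unal-Dumps | Coding-Theory/sardinas_patterson/main.py | solve_equations
-- ===== SOURCE A (Python) =====
-- def solve_equations(code: set[str], c_prev: set[str]) -> set[str]:
--     c_next: set[str] = set()
--     for x in code:
--         for y in c_prev:
--             if y.startswith(x):
--                 c_next.add(y[len(x):])
--             elif x.startswith(y):
--                 c_next.add(x[len(y):])
--     c_next.discard("")
--     return c_next
-- ===== SOURCE B (Python) =====
-- def _dangling(x, y):
--     # strip the common leading characters; when one word is exhausted the
--     # other's remainder is the dangling suffix, on a mismatch there is none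
--     while x and y:
--         if x[0] != y[0]:
--             return None
--         x, y = x[1:], y[1:]
--     return x + y
--
--
-- def solve_equations(code: set[str], c_prev: set[str]) -> set[str]:
--     return {s for x in code for y in c_prev if (s := _dangling(x, y))}
-- ===== Notes on version B (the rewrite author's own statement) =====
-- stated objective: alternative
-- what changed: Each pair is decided by one character-by-character common-prefix stripping loop that directly yields the dangling suffix (instead of two startswith tests with length-based slicing), empty suffixes are filtered out up front by truthiness instead of a final discard, and the result set is built once from the comprehension stream instead of by repeated .add; the pair traversal order is kept.
import Mathlib
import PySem

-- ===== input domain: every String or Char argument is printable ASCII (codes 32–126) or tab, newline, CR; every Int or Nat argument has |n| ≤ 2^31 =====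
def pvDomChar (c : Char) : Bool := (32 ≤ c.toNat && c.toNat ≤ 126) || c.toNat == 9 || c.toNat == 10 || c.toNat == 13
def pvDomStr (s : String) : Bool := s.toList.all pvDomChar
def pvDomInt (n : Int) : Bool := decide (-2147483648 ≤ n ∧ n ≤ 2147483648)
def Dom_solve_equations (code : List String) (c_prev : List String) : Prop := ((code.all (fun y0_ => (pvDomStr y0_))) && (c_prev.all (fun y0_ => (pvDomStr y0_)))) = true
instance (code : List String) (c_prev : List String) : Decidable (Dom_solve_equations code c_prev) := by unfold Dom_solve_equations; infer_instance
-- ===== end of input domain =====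

-- B replaces the two startswith/slice branches by one common-prefix-stripping recursion per pair
-- and builds the result set once from the filtered suffix stream (objective: alternative).


-- ===== PORT A =====
def solve_equations (code : List String) (c_prev : List String) : List String :=
  let c_next : PySem.Set String :=
    code.foldl (fun acc x =>
      c_prev.foldl (fun acc y =>
        if PySem.Str.startswith y x then
          PySem.Set.add acc (PySem.Str.slice y (some (PySem.Str.len x)) none)
        else if PySem.Str.startswith x y then
          PySem.Set.add acc (PySem.Str.slice x (some (PySem.Str.len y)) none)
        else acc) acc) PySem.Set.empty
  PySem.Set.discard c_next ""

-- ===== PORT B =====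
-- _dangling: the while loop strips one common leading character per iteration; it ends when a
-- word is exhausted (return the concatenation of the remainders, one of which is empty) or
-- returns None on a character mismatch.
def dangB : List Char → List Char → Option (List Char)
  | a :: x, b :: y => if a = b then dangB x y else none
  | x, y => some (x ++ y)

def solve_equations_alt (code : List String) (c_prev : List String) : List String :=
  PySem.Set.ofList (code.flatMap (fun x =>
    c_prev.filterMap (fun y =>
      match dangB x.toList y.toList with
      | none => none
      | some s => if s.isEmpty then none else some (String.ofList s))))

-- ===== PRECONDITION & SPEC =====
def Spec_solve_equations (code : List String) (c_prev : List String) (out : List String) : Prop := out = solve_equations_alt code c_prev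
instance (code : List String) (c_prev : List String) (out : List String) : Decidable (Spec_solve_equations code c_prev out) := by unfold Spec_solve_equations; infer_instance

-- ===== CLAIM (what is proved, stated in full; the proofs are below) =====
def Claim_equal_solve_equations : Prop := ∀ (code : List String) (c_prev : List String), Dom_solve_equations code c_prev → Spec_solve_equations code c_prev (solve_equations code c_prev)

-- ===== LEMMAS AND PROOFS =====

-- A's per-pair emission, as an Option
def emitA (x y : String) : Option String :=
  if PySem.Str.startswith y x then some (PySem.Str.slice y (some (PySem.Str.len x)) none)
  else if PySem.Str.startswith x y then some (PySem.Str.slice x (some (PySem.Str.len y)) none)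
  else none

-- B's entry for a pair, as a function
def entryB (x y : String) : Option String :=
  match dangB x.toList y.toList with
  | none => none
  | some s => if s.isEmpty then none else some (String.ofList s)

-- B's per-pair recursion computes exactly A's branch chain (on char lists)
lemma dangB_eq (x y : List Char) :
    dangB x y =
      if PySem.Chars.startswith y x then some (y.drop x.length)
      else if PySem.Chars.startswith x y then some (x.drop y.length)
      else none := by
  induction x generalizing y with
  | nil => cases y <;> simp [dangB, PySem.Chars.startswith, List.isPrefixOf]
  | cons a x ih =>
    cases y with
    | nil => simp [dangB, PySem.Chars.startswith, List.isPrefixOf]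
    | cons b y =>
      by_cases h : a = b
      · subst h
        simp [dangB, ih y, PySem.Chars.startswith, List.isPrefixOf]
      · simp [dangB, h, PySem.Chars.startswith, List.isPrefixOf, Ne.symm h]

lemma ofList_beq_empty (l : List Char) : (String.ofList l == "") = l.isEmpty := by
  cases l with
  | nil => rfl
  | cons a l =>
    simp only [List.isEmpty_cons]
    apply beq_eq_false_iff_ne.mpr
    intro h
    have : (String.ofList (a :: l)).toList = ("" : String).toList := by rw [h]
    simp at this

-- filtering the empty suffix out of A's emission is B's per-pair entry
lemma emitA_filter (x y : String) :
    (match emitA x y with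
      | none => none
      | some s => if s == "" then none else some s) = entryB x y := by
  unfold entryB
  rw [dangB_eq]
  unfold emitA
  simp only [PySem.Str.startswith_eq, PySem.Str.len_eq, PySem.Str.slice]
  split_ifs <;> simp [ofList_beq_empty]

-- A's inner loop is a fold of Set.add over the emitted stream
lemma inner_loop (x : String) (c_prev : List String) (acc : PySem.Set String) :
    c_prev.foldl (fun acc y =>
        if PySem.Str.startswith y x then
          PySem.Set.add acc (PySem.Str.slice y (some (PySem.Str.len x)) none)
        else if PySem.Str.startswith x y then
          PySem.Set.add acc (PySem.Str.slice x (some (PySem.Str.len y)) none)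
        else acc) acc
    = (c_prev.filterMap (emitA x)).foldl PySem.Set.add acc := by
  rw [List.foldl_filterMap]
  congr 1
  funext acc y
  unfold emitA
  split_ifs <;> rfl

-- discarding an element from a built set is building the set from the filtered stream
lemma discard_foldl_add (l : List String) (init : PySem.Set String) (a : String) :
    PySem.Set.discard (l.foldl PySem.Set.add init) a
      = (l.filter (fun s => !(s == a))).foldl PySem.Set.add (PySem.Set.discard init a) := by
  induction l generalizing init with
  | nil => rfl
  | cons x l ih =>
    simp only [List.foldl_cons]
    rw [ih]
    by_cases hx : x = a
    · subst hx
      have h1 : List.filter (fun s => !(s == x)) (x :: l) = List.filter (fun s => !(s == x)) l := by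
        simp
      rw [h1]
      congr 1
      unfold PySem.Set.add PySem.Set.discard
      split_ifs with h
      · rfl
      · simp [List.filter_append]
    · have hb : (!(x == a)) = true := by simp [hx]
      have h1 : List.filter (fun s => !(s == a)) (x :: l) = x :: List.filter (fun s => !(s == a)) l := by
        simp [hb]
      rw [h1, List.foldl_cons]
      congr 1
      unfold PySem.Set.add PySem.Set.discard
      have hmem : PySem.Set.contains (List.filter (fun y => !(y == a)) init) x
          = PySem.Set.contains init x := by
        simp [PySem.Set.contains, List.mem_filter, hx]
      rw [hmem]
      unfold PySem.Set.contains
      split_ifs with h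
      · rfl
      · simp [List.filter_append, hx]

-- the filtered A-stream is B's stream, per outer word
lemma stream_eq (x : String) (c_prev : List String) :
    (c_prev.filterMap (emitA x)).filter (fun s => !(s == ""))
      = c_prev.filterMap (entryB x) := by
  induction c_prev with
  | nil => rfl
  | cons y l ih =>
    have h := emitA_filter x y
    simp only [List.filterMap_cons]
    cases he : emitA x y with
    | none =>
      rw [he] at h
      rw [← h, ih]
    | some s =>
      rw [he] at h
      rw [← h]
      by_cases hs : s == ""
      · simp only [hs]
        have : (!(s == "")) = false := by simp [hs]
        simp [this, ih]
      · have hb : (!(s == "")) = true := by simp_all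
        simp [hs, ih]

-- ===== VERDICT (by name: the statement is the Claim_ definition above) =====
theorem solve_equations_spec : Claim_equal_solve_equations := by
  intro code c_prev _
  unfold Spec_solve_equations solve_equations solve_equations_alt
  simp only [inner_loop]
  rw [show (code.foldl (fun acc x => (c_prev.filterMap (emitA x)).foldl PySem.Set.add acc)
        PySem.Set.empty)
      = (code.flatMap (fun x => c_prev.filterMap (emitA x))).foldl PySem.Set.add
        PySem.Set.empty from (List.foldl_flatMap ..).symm]
  rw [discard_foldl_add]
  rw [List.filter_flatMap]
  simp only [stream_eq]
  rfl
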